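-- pv_equiv track=rewrite | github.com/iamgp/phlo | src/phlo/publishing/trino_to_postgres.py | _split_trino_qualified_name
-- ===== SOURCE A (Python) =====
-- def _split_trino_qualified_name(name: str) -> list[tuple[str, bool]]:
--     """Split a Trino qualified name into parts and track quoted identifiers."""
--
--     parts: list[tuple[str, bool]] = []
--     buffer: list[str] = []
--     in_quotes = False
--     part_quoted = False
--     index = 0
--     while index < len(name):
--         char = name[index]
--         if char == '"':
--             if in_quotes and index + 1 < len(name) and name[index + 1] == '"':
--                 buffer.append('"')
--                 index += 1
--             else:
--                 in_quotes = not in_quotes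
--                 part_quoted = True
--         elif char == "." and not in_quotes:
--             part = "".join(buffer)
--             if not part:
--                 raise ValueError("Trino table name has an empty identifier part.")
--             parts.append((part, part_quoted))
--             buffer = []
--             part_quoted = False
--         elif not in_quotes and char.isspace():
--             pass
--         else:
--             buffer.append(char)
--         index += 1
--     if in_quotes:
--         raise ValueError("Trino table name has an unterminated quoted identifier.")
--     part = "".join(buffer)
--     if not part:
--         raise ValueError("Trino table name has an empty identifier part.")
--     parts.append((part, part_quoted))
--     return parts
-- ===== SOURCE B (Python) =====
-- def _split_trino_qualified_name(name: str) -> list[tuple[str, bool]]: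
--     """Split a Trino qualified name into parts and track quoted identifiers.
--
--     Two passes: first a quote-aware tokenizer cuts the string into top-level
--     segments (splitting only on '.' outside quotes, keeping '""' as one escape
--     token), then each segment is rendered into its identifier independently.
--     """
--     # pass 1: tokenize into segments of tokens ('"' toggle, '""' escape, or a char)
--     segments = []
--     seg = []
--     in_q = False
--     i = 0
--     n = len(name)
--     while i < n:
--         c = name[i]
--         if c == '"':
--             if in_q and i + 1 < n and name[i + 1] == '"':
--                 seg.append('""')
--                 i += 1
--             else:
--                 in_q = not in_q
--                 seg.append('"')
--         elif c == "." and not in_q: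
--             segments.append(seg)
--             seg = []
--         else:
--             seg.append(c)
--         i += 1
--     if in_q:
--         raise ValueError("Trino table name has an unterminated quoted identifier.")
--     segments.append(seg)
--     # pass 2: render each segment
--     out = []
--     for seg in segments:
--         chars = []
--         quoted = False
--         q = False
--         for tok in seg:
--             if tok == '""':
--                 chars.append('"')
--             elif tok == '"':
--                 quoted = True
--                 q = not q
--             elif q or not tok.isspace():
--                 chars.append(tok)
--         part = "".join(chars)
--         if not part:
--             raise ValueError("Trino table name has an empty identifier part.")
--         out.append((part, quoted))
--     return out
-- ===== Notes on version B (the rewrite author's own statement) =====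
-- stated objective: alternative
-- what changed: B replaces A's single character-at-a-time state machine that interleaves splitting, whitespace dropping, escape handling and part emission with a two-phase pipeline: a tokenizer that cuts the string into top-level segments of tokens, then an independent per-segment renderer.
import Mathlib
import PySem

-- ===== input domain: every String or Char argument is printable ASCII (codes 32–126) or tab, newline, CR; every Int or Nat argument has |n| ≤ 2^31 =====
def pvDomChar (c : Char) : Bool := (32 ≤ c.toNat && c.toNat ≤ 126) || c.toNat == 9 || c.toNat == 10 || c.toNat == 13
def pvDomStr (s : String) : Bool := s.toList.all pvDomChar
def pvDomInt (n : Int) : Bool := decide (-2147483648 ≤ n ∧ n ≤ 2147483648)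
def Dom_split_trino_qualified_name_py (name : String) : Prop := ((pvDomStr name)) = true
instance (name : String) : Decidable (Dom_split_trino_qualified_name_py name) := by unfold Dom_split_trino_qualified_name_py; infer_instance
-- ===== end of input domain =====

-- B is an alternative decomposition of A: tokenize into top-level segments first, render each
-- segment independently second; A and B raise on exactly the same inputs (excluded by Pre_)
-- and return identical values elsewhere.

-- ===== PORT A =====
-- A's while-loop over the index; `none` marks the inputs where the Python raises ValueError.
def aLoop : List Char → List Char → Bool → Bool → List (String × Bool) → Option (List (String × Bool))
  | [], buf, inq, pq, parts =>
      if inq then none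
      else if buf.isEmpty then none
      else some (parts ++ [(String.ofList buf, pq)])
  | c :: rest, buf, inq, pq, parts =>
      if c = '"' then
        if inq && rest.head? == some '"' then
          aLoop rest.tail (buf ++ ['"']) inq pq parts
        else
          aLoop rest buf (!inq) true parts
      else if c = '.' && !inq then
        if buf.isEmpty then none
        else aLoop rest [] false false (parts ++ [(String.ofList buf, pq)])
      else if !inq && PySem.Chars.isspace c then
        aLoop rest buf inq pq parts
      else
        aLoop rest (buf ++ [c]) inq pq parts
  termination_by cs => cs.length
  decreasing_by all_goals (simp [List.length_tail]; try omega)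

def split_trino_qualified_name_py (name : String) : List (String × Bool) :=
  (aLoop name.toList [] false false []).getD []

-- ===== PORT B =====
-- pass 1: cut into top-level segments of tokens; a token is ['"','"'] (escape), ['"'] (toggle) or [c].
def bSplit : List Char → Bool → List (List Char) → List (List (List Char)) →
    Option (List (List (List Char)))
  | [], inq, seg, segs => if inq then none else some (segs ++ [seg])
  | c :: rest, inq, seg, segs =>
      if c = '"' then
        if inq && rest.head? == some '"' then
          bSplit rest.tail inq (seg ++ [['"', '"']]) segs
        else
          bSplit rest (!inq) (seg ++ [['"']]) segs
      else if c = '.' && !inq then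
        bSplit rest false [] (segs ++ [seg])
      else
        bSplit rest inq (seg ++ [[c]]) segs
  termination_by cs => cs.length
  decreasing_by all_goals (simp [List.length_tail]; try omega)

-- pass 2: render one segment's tokens (chars, quoted flag, current in-quote state).
def bSeg : List (List Char) → List Char → Bool → Bool → List Char × Bool × Bool
  | [], chars, quoted, q => (chars, quoted, q)
  | t :: ts, chars, quoted, q =>
      if t = ['"', '"'] then bSeg ts (chars ++ ['"']) quoted q
      else if t = ['"'] then bSeg ts chars true (!q)
      else if !q && PySem.Chars.strIsspace t then bSeg ts chars quoted q
      else bSeg ts (chars ++ t) quoted q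

def bCollect : List (List (List Char)) → Option (List (String × Bool))
  | [] => some []
  | seg :: rest =>
      let r := bSeg seg [] false false
      if r.1.isEmpty then none
      else (bCollect rest).map (fun out => (String.ofList r.1, r.2.1) :: out)

def split_trino_qualified_name_py_alt (name : String) : List (String × Bool) :=
  ((bSplit name.toList false [] []).bind bCollect).getD []

-- ===== PRECONDITION & SPEC =====
-- Pre_ excludes exactly the inputs where the Python A raises ValueError (an unterminated quote,
-- or an empty identifier part); well-quotedness is inherently an automaton condition, so the
-- predicate is a minimal two-bit acceptor (in-quotes?, current-part-nonempty?) computing no output.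
def preScan : List Char → Bool → Bool → Bool
  | [], inq, ne => !inq && ne
  | [c], inq, ne =>
      if c = '"' then inq && ne
      else if c = '.' && !inq then false
      else if !inq && PySem.Chars.isspace c then ne
      else !inq
  | c :: (d :: rest'), inq, ne =>
      if c = '"' then
        if inq && d = '"' then preScan rest' true true
        else preScan (d :: rest') (!inq) ne
      else if c = '.' && !inq then ne && preScan (d :: rest') false false
      else if !inq && PySem.Chars.isspace c then preScan (d :: rest') inq ne
      else preScan (d :: rest') inq true
  termination_by structural cs => cs

def Pre_split_trino_qualified_name_py (name : String) : Prop :=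
  preScan name.toList false false = true
instance (name : String) : Decidable (Pre_split_trino_qualified_name_py name) := by
  unfold Pre_split_trino_qualified_name_py; infer_instance

def pvWitness_split_trino_qualified_name_py : String := "catalog.my schema.\"ta\"\"b.le\""

def Spec_split_trino_qualified_name_py (name : String) (out : List (String × Bool)) : Prop :=
  out = split_trino_qualified_name_py_alt name
instance (name : String) (out : List (String × Bool)) :
    Decidable (Spec_split_trino_qualified_name_py name out) := by
  unfold Spec_split_trino_qualified_name_py; infer_instance

-- ===== CLAIM (what is proved, stated in full; the proofs are below) =====
def Claim_equal_split_trino_qualified_name_py : Prop :=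
  ∀ (name : String), Dom_split_trino_qualified_name_py name →
    Pre_split_trino_qualified_name_py name →
    Spec_split_trino_qualified_name_py name (split_trino_qualified_name_py name)

-- ===== LEMMAS AND PROOFS =====

lemma bSeg_append (ts us : List (List Char)) (chars : List Char) (quoted q : Bool) :
    bSeg (ts ++ us) chars quoted q =
      bSeg us (bSeg ts chars quoted q).1 (bSeg ts chars quoted q).2.1 (bSeg ts chars quoted q).2.2 := by
  induction ts generalizing chars quoted q with
  | nil => simp [bSeg]
  | cons t ts ih =>
      simp only [List.cons_append, bSeg]
      split_ifs <;> exact ih ..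

lemma bCollect_append_single (segs : List (List (List Char))) (seg : List (List Char))
    (parts : List (String × Bool)) (h : bCollect segs = some parts) :
    bCollect (segs ++ [seg]) =
      (if (bSeg seg [] false false).1.isEmpty then none
       else some (parts ++ [(String.ofList (bSeg seg [] false false).1, (bSeg seg [] false false).2.1)])) := by
  induction segs generalizing parts with
  | nil =>
      simp [bCollect] at h
      subst h
      simp only [List.nil_append, bCollect]
      split_ifs <;> rfl
  | cons s segs ih =>
      simp only [List.cons_append, bCollect] at h ⊢
      by_cases h1 : (bSeg s [] false false).1.isEmpty
      · simp [h1] at h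
      · simp only [h1, Bool.false_eq_true, if_false] at h ⊢
        cases hrec : bCollect segs with
        | none => rw [hrec] at h; simp at h
        | some p =>
            rw [hrec] at h
            simp only [Option.map_some, Option.some.injEq] at h
            rw [ih p hrec]
            split_ifs with h2 <;> simp [← h]

lemma bCollect_none_append (segs more : List (List (List Char)))
    (h : bCollect segs = none) : bCollect (segs ++ more) = none := by
  induction segs with
  | nil => simp [bCollect] at h
  | cons s segs ih =>
      simp only [List.cons_append, bCollect] at h ⊢
      by_cases h1 : (bSeg s [] false false).1.isEmpty
      · simp [h1]
      · simp only [h1, Bool.false_eq_true, if_false] at h ⊢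
        cases hrec : bCollect segs with
        | none => simp [ih hrec]
        | some p => simp [hrec] at h

lemma bSplit_segs (cs : List Char) (inq : Bool) (seg : List (List Char))
    (segs : List (List (List Char))) :
    bSplit cs inq seg segs = (bSplit cs inq seg []).map (fun l => segs ++ l) := by
  induction hn : cs.length using Nat.strong_induction_on generalizing cs inq seg segs with
  | _ n ih =>
  cases cs with
  | nil => cases inq <;> simp [bSplit]
  | cons c rest =>
      subst hn
      simp only [bSplit]
      split_ifs with h1 h2 h3
      · rw [ih rest.tail.length (by simp [List.length_tail]; try omega) _ _ _ _ rfl]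
      · rw [ih rest.length (by simp) _ _ _ _ rfl]
      · simp only [List.nil_append]
        rw [ih rest.length (by simp) rest false [] (segs ++ [seg]) rfl,
            ih rest.length (by simp) rest false [] [seg] rfl]
        cases bSplit rest false [] [] <;> simp
      · rw [ih rest.length (by simp) _ _ _ _ rfl]

lemma main_invariant (cs : List Char) :
    ∀ (buf : List Char) (inq pq : Bool) (parts : List (String × Bool))
      (seg : List (List Char)) (segs : List (List (List Char))),
      bSeg seg [] false false = (buf, pq, inq) →
      bCollect segs = some parts →
      aLoop cs buf inq pq parts = (bSplit cs inq seg segs).bind bCollect := by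
  induction hn : cs.length using Nat.strong_induction_on generalizing cs with
  | _ n ih =>
  intro buf inq pq parts seg segs h1 h2
  cases cs with
  | nil =>
      simp only [aLoop, bSplit]
      cases inq with
      | true => simp
      | false =>
          simp only [Bool.false_eq_true, if_false, Option.bind_some]
          rw [bCollect_append_single segs seg parts h2, h1]
  | cons c rest =>
      subst hn
      simp only [aLoop, bSplit]
      split_ifs with hc hesc hdot hbuf hsp
      · -- escape: '""' inside quotes
        refine ih rest.tail.length (by simp [List.length_tail]; try omega) _ rfl _ _ _ _ _ _ ?_ h2
        rw [bSeg_append, h1]; simp [bSeg]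
      · -- quote toggle
        refine ih rest.length (by simp) _ rfl _ _ _ _ _ _ ?_ h2
        rw [bSeg_append, h1]; simp [bSeg]
      · -- dot with empty part: A raises here; B's collect fails on this segment
        have hfail : bCollect (segs ++ [seg]) = none := by
          rw [bCollect_append_single segs seg parts h2, h1]; simp [hbuf]
        rw [bSplit_segs rest false [] (segs ++ [seg])]
        cases hb : bSplit rest false [] [] with
        | none => simp
        | some l =>
            simp only [Option.map_some, Option.bind_some]
            exact (bCollect_none_append _ _ hfail).symm
      · -- dot with nonempty part
        refine ih rest.length (by simp) _ rfl _ _ _ _ [] _ (by simp [bSeg]) ?_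
        rw [bCollect_append_single segs seg parts h2, h1]
        simp [hbuf]
      · -- whitespace outside quotes: kept as a token in pass 1, dropped in pass 2
        refine ih rest.length (by simp) _ rfl _ _ _ _ _ _ ?_ h2
        rw [bSeg_append, h1]
        cases inq with
        | true => simp at hsp
        | false =>
            simp only [Bool.not_false, Bool.true_and] at hsp
            simp [bSeg, hc, PySem.Chars.strIsspace, hsp]
      · -- regular character
        refine ih rest.length (by simp) _ rfl _ _ _ _ _ _ ?_ h2
        rw [bSeg_append, h1]
        cases inq with
        | true => simp [bSeg, hc]
        | false =>
            simp only [Bool.not_false, Bool.true_and, Bool.not_eq_true] at hsp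
            simp [bSeg, hc, PySem.Chars.strIsspace, hsp]

-- ===== VERDICT (by name: the statement is the Claim_ definition above) =====
theorem split_trino_qualified_name_py_spec : Claim_equal_split_trino_qualified_name_py := by
  intro name _ _
  unfold Spec_split_trino_qualified_name_py split_trino_qualified_name_py
    split_trino_qualified_name_py_alt
  rw [main_invariant name.toList [] false false [] [] [] (by simp [bSeg]) (by simp [bCollect])]
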